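-- pv_equiv track=rewrite | github.com/pmrowla/aoc2018 | day2.py | part_one
-- ===== SOURCE A (Python) =====
-- from collections import Counter
--
-- def part_one(lines):
--     two = 0
--     three = 0
--     for line in lines:
--         c = Counter(line)
--         if 2 in c.values():
--             two += 1
--         if 3 in c.values():
--             three += 1
--     return two * three
-- ===== SOURCE B (Python) =====
-- def _reps(s):
--     # Repeated-elimination scan: strip all copies of the first character with
--     # str.replace, the length drop is that character's multiplicity; no
--     # frequency table (and no sort) is ever built.
--     two = False
--     three = False
--     while s:
--         ch = s[0]
--         rest = s.replace(ch, '')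
--         removed = len(s) - len(rest)
--         if removed == 2:
--             two = True
--         if removed == 3:
--             three = True
--         s = rest
--     return two, three
--
--
-- def part_one(lines):
--     flags = [_reps(line) for line in lines]
--     return sum(1 for t, _ in flags if t) * sum(1 for _, t in flags if t)
-- ===== Notes on version B (the rewrite author's own statement) =====
-- stated objective: faster
-- what changed: Per line, repeat multiplicities are found by repeated elimination (str.replace strips all copies of the current first character and the length drop is its multiplicity) instead of building a Counter hash table, and the single accumulator loop becomes a map to flag pairs plus two counting passes.
import Mathlib
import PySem

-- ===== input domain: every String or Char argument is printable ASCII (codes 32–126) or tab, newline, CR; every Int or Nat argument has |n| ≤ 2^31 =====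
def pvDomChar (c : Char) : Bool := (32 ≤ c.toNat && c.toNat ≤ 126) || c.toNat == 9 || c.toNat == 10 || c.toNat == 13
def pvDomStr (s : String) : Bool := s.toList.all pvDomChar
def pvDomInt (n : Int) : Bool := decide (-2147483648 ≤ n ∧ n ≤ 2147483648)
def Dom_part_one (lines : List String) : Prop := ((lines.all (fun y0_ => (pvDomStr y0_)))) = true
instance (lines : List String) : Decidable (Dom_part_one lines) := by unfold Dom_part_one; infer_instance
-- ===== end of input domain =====

-- B finds each line's repeat multiplicities by repeated elimination (strip all copies
-- of the current first character; the length drop is its multiplicity) instead of a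
-- Counter hash table, then tallies flag pairs in two counting passes; equivalence on all inputs.

-- ===== PORT A =====
-- A: one loop carrying (two, three); per line a Counter, then '2 in c.values()' / '3 in c.values()'.
def part_one (lines : List String) : Int :=
  let st := lines.foldl (fun (st : Int × Int) line =>
    let c := PySem.Dict.counter line.toList
    let two := if (2 : Int) ∈ c.values then st.1 + 1 else st.1
    let three := if (3 : Int) ∈ c.values then st.2 + 1 else st.2
    (two, three)) (0, 0)
  st.1 * st.2

-- ===== PORT B =====
-- _reps: while s nonempty, strip every copy of the head char (s.replace(ch, '')),
-- the length drop 'removed' is that char's multiplicity; flag removed==2 / removed==3.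
def reps : List Char → Bool × Bool
  | [] => (false, false)
  | c :: s =>
    let rest := s.filter (fun x => !(x == c))
    let removed : Int := ((s.length : Int) + 1) - (rest.length : Int)
    let st := reps rest
    (st.1 || removed == 2, st.2 || removed == 3)
termination_by ys => ys.length
decreasing_by
  simp only [List.length_cons, List.length_unattach]
  exact Nat.lt_succ_of_le (le_trans (List.length_filter_le _ _) (by simp))

def part_one_alt (lines : List String) : Int :=
  let flags := lines.map (fun line => reps line.toList)
  let two : Int := flags.countP (fun p => p.1)
  let three : Int := flags.countP (fun p => p.2)
  two * three

-- ===== PRECONDITION & SPEC =====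
def Spec_part_one (lines : List String) (out : Int) : Prop := out = part_one_alt lines
instance (lines : List String) (out : Int) : Decidable (Spec_part_one lines out) := by unfold Spec_part_one; infer_instance

-- ===== CLAIM (what is proved, stated in full; the proofs are below) =====
def Claim_equal_part_one : Prop := ∀ (lines : List String), Dom_part_one lines → Spec_part_one lines (part_one lines)

-- ===== LEMMAS AND PROOFS =====

-- facts about the residue s.filter (≠ head): its length, counts and membership
theorem rest_facts (s : List Char) (c : Char) :
    ((s.filter (fun x => !(x == c))).length : Int) = (s.length : Int) - s.count c ∧
    (∀ d, d ≠ c → (s.filter (fun x => !(x == c))).count d = s.count d) ∧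
    (∀ d, d ∈ s.filter (fun x => !(x == c)) ↔ d ∈ s ∧ d ≠ c) := by
  refine ⟨?_, ?_, ?_⟩
  · have h1 : s.length = (s.filter (fun a => (a == c))).length +
        (s.filter (fun a => !(a == c))).length := by
      simpa using List.length_eq_length_filter_add (l := s) (fun a => a == c)
    have hc : s.count c = (s.filter (fun a => (a == c))).length := by
      simpa using (List.countP_eq_length_filter (l := s) (p := (· == c)))
    have hle : s.count c ≤ s.length := List.count_le_length
    omega
  · intro d hd
    rw [List.count_filter]
    simp [hd]
  · intro d
    simp only [List.mem_filter, Bool.not_eq_eq_eq_not, Bool.not_true, beq_eq_false_iff_ne,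
      ne_eq]

-- one elimination step: the flag after processing head c is "old flag or multiplicity-of-c = n"
theorem orstep (s : List Char) (c : Char) (b : Bool) (n : Nat)
    (hb : b = true ↔ ∃ d, d ∈ s.filter (fun x => !(x == c)) ∧
      (s.filter (fun x => !(x == c))).count d = n) :
    (b || ((((s.length : Int) + 1) - ((s.filter (fun x => !(x == c))).length : Int)) == (n : Int)))
      = true ↔ ∃ d, d ∈ (c :: s) ∧ (c :: s).count d = n := by
  obtain ⟨hlen, hcnt, hmem⟩ := rest_facts s c
  rw [Bool.or_eq_true, hb]
  have hself : (c :: s).count c = s.count c + 1 := by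
    simp
  have hrem : ((((s.length : Int) + 1) - ((s.filter (fun x => !(x == c))).length : Int))
      == (n : Int)) = true ↔ (c :: s).count c = n := by
    rw [beq_iff_eq, hlen, hself]
    constructor <;> intro h <;> omega
  rw [hrem]
  constructor
  · rintro (⟨d, hd, hdc⟩ | h)
    · obtain ⟨hds, hdne⟩ := (hmem d).mp hd
      refine ⟨d, List.mem_cons_of_mem _ hds, ?_⟩
      rw [hcnt d hdne] at hdc
      simpa [List.count_cons, Ne.symm hdne] using hdc
    · exact ⟨c, List.mem_cons_self, h⟩
  · rintro ⟨d, hd, hdc⟩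
    by_cases hdcne : d = c
    · subst hdcne; exact Or.inr hdc
    · refine Or.inl ⟨d, (hmem d).mpr ⟨?_, hdcne⟩, ?_⟩
      · rcases List.mem_cons.mp hd with h | h
        · exact absurd h hdcne
        · exact h
      · rw [hcnt d hdcne]
        simpa [List.count_cons, Ne.symm hdcne] using hdc
    
-- B's elimination flags are exactly "some char occurs exactly 2 (resp. 3) times".
theorem reps_spec : ∀ (k : Nat) (xs : List Char), xs.length ≤ k →
    (((reps xs).1 = true ↔ ∃ d, d ∈ xs ∧ xs.count d = 2) ∧
     ((reps xs).2 = true ↔ ∃ d, d ∈ xs ∧ xs.count d = 3)) := by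
  intro k
  induction k with
  | zero =>
    intro xs hk
    have : xs = [] := List.eq_nil_of_length_eq_zero (Nat.le_zero.mp hk)
    subst this
    simp [reps]
  | succ k ih =>
    intro xs hk
    cases xs with
    | nil => simp [reps]
    | cons c s =>
      have hrest : (s.filter (fun x => !(x == c))).length ≤ k := by
        have := List.length_filter_le (fun x => !(x == c)) s
        simp only [List.length_cons] at hk
        omega
      have ihr := ih (s.filter (fun x => !(x == c))) hrest
      constructor
      · rw [show (reps (c :: s)).1 =
          ((reps (s.filter (fun x => !(x == c)))).1 ||
            ((((s.length : Int) + 1) - ((s.filter (fun x => !(x == c))).length : Int)) == 2)) by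
          rw [reps]]
        exact orstep s c _ 2 ihr.1
      · rw [show (reps (c :: s)).2 =
          ((reps (s.filter (fun x => !(x == c)))).2 ||
            ((((s.length : Int) + 1) - ((s.filter (fun x => !(x == c))).length : Int)) == 3)) by
          rw [reps]]
        exact orstep s c _ 3 ihr.2

-- A's Counter-values membership test, characterised.
theorem counter_values_mem (xs : List Char) (n : Nat) :
    ((n : Int) ∈ (PySem.Dict.counter xs).values) ↔ ∃ c, c ∈ xs ∧ xs.count c = n := by
  have hvals : (PySem.Dict.counter xs).values =
      (PySem.Set.ofList xs).map (fun k => (xs.count k : Int)) := by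
    simp only [PySem.Dict.values, PySem.Dict.items_counter, List.map_map]
    rfl
  rw [hvals]
  constructor
  · intro hm
    rcases List.mem_map.mp hm with ⟨k, hk, hkeq⟩
    exact ⟨k, (PySem.Set.mem_ofList _ _).mp hk, by exact_mod_cast hkeq⟩
  · rintro ⟨c, hc, hcnt⟩
    exact List.mem_map.mpr ⟨c, (PySem.Set.mem_ofList _ _).mpr hc, by exact_mod_cast hcnt⟩

-- A's accumulator loop computes the two countP's.
theorem fold_counts (lines : List String) (a b : Int) :
    lines.foldl (fun (st : Int × Int) line =>
      let c := PySem.Dict.counter line.toList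
      let two := if (2 : Int) ∈ c.values then st.1 + 1 else st.1
      let three := if (3 : Int) ∈ c.values then st.2 + 1 else st.2
      (two, three)) (a, b) =
    (a + lines.countP (fun line => (2 : Int) ∈ (PySem.Dict.counter line.toList).values),
     b + lines.countP (fun line => (3 : Int) ∈ (PySem.Dict.counter line.toList).values)) := by
  induction lines generalizing a b with
  | nil => simp
  | cons l t ih =>
    simp only [List.foldl_cons, List.countP_cons, ih]
    by_cases h2 : (2 : Int) ∈ (PySem.Dict.counter l.toList).values <;>
      by_cases h3 : (3 : Int) ∈ (PySem.Dict.counter l.toList).values <;>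
        simp [h2, h3, Prod.ext_iff] <;> omega

-- ===== VERDICT (by name: the statement is the Claim_ definition above) =====
theorem part_one_spec : Claim_equal_part_one := by
  intro lines _
  unfold Spec_part_one part_one part_one_alt
  rw [fold_counts]
  simp only [List.countP_map, zero_add]
  congr 2 <;> apply List.countP_congr <;> intro l _ <;>
    simp only [Function.comp]
  · have h1 := counter_values_mem l.toList 2
    have h2 := (reps_spec l.toList.length l.toList le_rfl).1
    norm_cast at h1
    simp only [decide_eq_true_iff]
    exact h1.trans h2.symm
  · have h1 := counter_values_mem l.toList 3
    have h2 := (reps_spec l.toList.length l.toList le_rfl).2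
    norm_cast at h1
    simp only [decide_eq_true_iff]
    exact h1.trans h2.symm
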